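-- pv_equiv track=rewrite | github.com/Soumyadeepaul/Code_Workout | Toggle K bits.py | toggleKBits
-- ===== SOURCE A (Python) =====
-- def toggleKBits(n, k):
--
--     # Write your code here.
--     # This function returns updated number after toggling the given K bits.
--
--     result=0
--     power=1
--     while n:
--         rem=n%2
--         if k!=0:
--             if rem:
--                 rem=0
--             else:
--                 rem=1
--             k-=1
--         result+=rem*power
--         power=power<<1
--         n=n//2
--     while k:
--         result+=1*power
--         power=power<<1
--         k-=1
--     return result
-- ===== SOURCE B (Python) =====
-- def toggleKBits(n, k):
--     mask = (1 << k) - 1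
--     return n ^ mask
-- ===== Notes on version B (the rewrite author's own statement) =====
-- stated objective: simpler
-- what changed: Replaced the digit-by-digit reconstruction loop (plus the trailing pad loop) with a single closed-form mask (1<<k)-1 applied by one XOR.
import Mathlib
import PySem

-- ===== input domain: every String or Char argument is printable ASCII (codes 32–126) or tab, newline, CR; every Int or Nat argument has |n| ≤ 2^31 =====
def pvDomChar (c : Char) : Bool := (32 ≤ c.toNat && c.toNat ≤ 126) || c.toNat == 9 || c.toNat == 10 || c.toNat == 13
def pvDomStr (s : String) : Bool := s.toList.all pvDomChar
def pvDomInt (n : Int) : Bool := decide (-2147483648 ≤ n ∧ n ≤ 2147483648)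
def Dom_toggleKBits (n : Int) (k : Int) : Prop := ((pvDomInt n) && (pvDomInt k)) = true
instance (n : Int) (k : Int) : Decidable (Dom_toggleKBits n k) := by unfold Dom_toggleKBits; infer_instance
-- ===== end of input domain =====

-- B replaces A's bit-by-bit reconstruction loop (plus trailing pad loop) with the
-- closed-form mask (1 << k) - 1 applied by a single XOR (simpler; same values on Pre_).

-- ===== PORT A =====
-- `while n:` — Python diverges for n < 0 (n//2 never reaches 0); the port's guard
-- stops at n ≤ 0 instead, which only matters outside Pre_toggleKBits.
def toggleKBitsLoop1 (n k result power : Int) : Int × Int × Int :=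
  if n ≤ 0 then (k, result, power)
  else
    let rem := PySem.Int.mod n 2
    let rem' := if k ≠ 0 then (if rem ≠ 0 then (0 : Int) else 1) else rem
    let k' := if k ≠ 0 then k - 1 else k
    toggleKBitsLoop1 (PySem.Int.floordiv n 2) k' (result + rem' * power) (power <<< (1 : Nat))
termination_by n.toNat
decreasing_by
  rename_i h
  rw [PySem.Int.floordiv_eq_ediv_of_pos (by omega)]
  omega

-- `while k:` — Python diverges for k < 0; the port's guard stops at k ≤ 0 instead
-- (only matters outside Pre_toggleKBits).
def toggleKBitsLoop2 (k result power : Int) : Int :=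
  if k ≤ 0 then result
  else toggleKBitsLoop2 (k - 1) (result + 1 * power) (power <<< (1 : Nat))
termination_by k.toNat
decreasing_by omega

def toggleKBits (n : Int) (k : Int) : Int :=
  let t := toggleKBitsLoop1 n k 0 1
  toggleKBitsLoop2 t.1 t.2.1 t.2.2

-- ===== PORT B =====
-- `1 << k` raises ValueError in Python for k < 0 (outside Pre_toggleKBits);
-- for 0 ≤ k the shift by k.toNat is exact.
def toggleKBits_alt (n : Int) (k : Int) : Int :=
  let mask := ((1 : Int) <<< k.toNat) - 1
  PySem.Int.bxor n mask

-- ===== PRECONDITION & SPEC =====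
-- Pre_ excludes negative n and negative k: A's while-loops never terminate there
-- (floor division/decrement never reach 0), so A returns on exactly these inputs
-- (and B raises ValueError for k < 0).
def Pre_toggleKBits (n : Int) (k : Int) : Prop := 0 ≤ n ∧ 0 ≤ k
instance (n : Int) (k : Int) : Decidable (Pre_toggleKBits n k) := by unfold Pre_toggleKBits; infer_instance
def pvWitness_toggleKBits : Int × Int := (13, 3)

def Spec_toggleKBits (n : Int) (k : Int) (out : Int) : Prop := out = toggleKBits_alt n k
instance (n : Int) (k : Int) (out : Int) : Decidable (Spec_toggleKBits n k out) := by unfold Spec_toggleKBits; infer_instance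

-- ===== CLAIM (what is proved, stated in full; the proofs are below) =====
def Claim_equal_toggleKBits : Prop := ∀ (n : Int) (k : Int), Dom_toggleKBits n k → Pre_toggleKBits n k → Spec_toggleKBits n k (toggleKBits n k)

-- ===== LEMMAS AND PROOFS =====

lemma int_shiftLeft_one (p : Int) : p <<< (1 : Nat) = p * 2 := by
  rw [Int.shiftLeft_eq]; norm_num

-- the trailing `while k:` loop adds power * (2^k - 1)
lemma loop2_closed : ∀ (j : Nat) (result power : Int),
    toggleKBitsLoop2 (j : Int) result power = result + power * ((2 : Int) ^ j - 1) := by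
  intro j
  induction j with
  | zero => intro r p; rw [toggleKBitsLoop2]; simp
  | succ j ih =>
    intro r p
    rw [toggleKBitsLoop2]
    have h : ¬ ((j + 1 : Nat) : Int) ≤ 0 := by omega
    rw [if_neg h]
    have h1 : ((j + 1 : Nat) : Int) - 1 = (j : Int) := by push_cast; ring
    rw [h1, ih, int_shiftLeft_one]
    ring

-- one binary digit of "xor with the low-(j+1)-bits mask"
lemma xor_mask_succ (m j : Nat) :
    m ^^^ (2 ^ (j + 1) - 1) = 2 * ((m / 2) ^^^ (2 ^ j - 1)) + (1 - m % 2) := by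
  have hp : 2 ^ (j + 1) = 2 * 2 ^ j := by ring
  have h1 : 1 ≤ 2 ^ j := Nat.one_le_two_pow
  have hdiv : (m ^^^ (2 ^ (j + 1) - 1)) / 2 = (m / 2) ^^^ (2 ^ j - 1) := by
    rw [Nat.xor_div_two]
    congr 1
    omega
  have hmod := @Nat.xor_mod_two_eq_one m (2 ^ (j + 1) - 1)
  have hm1 : (2 ^ (j + 1) - 1) % 2 = 1 := by omega
  rw [hm1] at hmod
  have h2 : (m ^^^ (2 ^ (j + 1) - 1)) % 2 < 2 := Nat.mod_lt _ (by norm_num)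
  have h3 := Nat.div_add_mod (m ^^^ (2 ^ (j + 1) - 1)) 2
  omega

lemma mask_cast (j : Nat) : ((2 ^ j - 1 : Nat) : Int) = (2 : Int) ^ j - 1 := by
  have h1 : 1 ≤ 2 ^ j := Nat.one_le_two_pow
  push_cast [h1]
  ring

-- the whole program (first loop then second) computes result + power * (n ^^^ mask)
lemma loop1_closed : ∀ (m : Nat) (k result power : Int), 0 ≤ k →
    (toggleKBitsLoop2 (toggleKBitsLoop1 (m : Int) k result power).1
       (toggleKBitsLoop1 (m : Int) k result power).2.1
       (toggleKBitsLoop1 (m : Int) k result power).2.2)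
      = result + power * ((m ^^^ (2 ^ k.toNat - 1) : Nat) : Int) := by
  intro m
  induction m using Nat.strong_induction_on with
  | _ m ih =>
    intro k result power hk
    by_cases hm : m = 0
    · subst hm
      rw [toggleKBitsLoop1]
      simp only [Nat.cast_zero, le_refl, if_pos]
      rw [Nat.zero_xor]
      have h2 := loop2_closed k.toNat result power
      rw [Int.toNat_of_nonneg hk] at h2
      rw [h2, mask_cast]
    · have hm0 : 0 < m := Nat.pos_of_ne_zero hm
      rw [toggleKBitsLoop1]
      have hng : ¬ ((m : Int) ≤ 0) := by omega
      rw [if_neg hng]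
      have hfd : PySem.Int.floordiv (m : Int) 2 = ((m / 2 : Nat) : Int) := by
        rw [PySem.Int.floordiv_eq_ediv_of_pos (by norm_num)]; omega
      have hmd : PySem.Int.mod (m : Int) 2 = ((m % 2 : Nat) : Int) := by
        rw [PySem.Int.mod_eq_emod_of_pos (by norm_num)]; omega
      rw [hfd, hmd, int_shiftLeft_one]
      have ihm := ih (m / 2) (Nat.div_lt_self hm0 (by norm_num))
      by_cases hk0 : k = 0
      · subst hk0
        simp only [ne_eq, not_true_eq_false, if_false]
        rw [ihm 0 (result + ((m % 2 : Nat) : Int) * power) (power * 2) le_rfl]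
        simp only [Int.toNat_zero, pow_zero, Nat.sub_self, Nat.xor_zero]
        have hmm : (m : Int) = 2 * ((m / 2 : Nat) : Int) + ((m % 2 : Nat) : Int) := by
          push_cast; omega
        rw [hmm]; ring
      · have hj : k.toNat = (k - 1).toNat + 1 := by omega
        simp only [ne_eq, hk0, not_false_eq_true, if_true]
        rw [ihm (k - 1) _ _ (by omega : (0 : Int) ≤ k - 1)]
        rw [hj, xor_mask_succ]
        have hcast : ((2 * ((m / 2) ^^^ (2 ^ (k - 1).toNat - 1)) + (1 - m % 2) : Nat) : Int)
            = 2 * (((m / 2) ^^^ (2 ^ (k - 1).toNat - 1) : Nat) : Int) + ((1 - m % 2 : Nat) : Int) := by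
          push_cast; ring
        rw [hcast]
        rcases Nat.mod_two_eq_zero_or_one m with h | h <;>
          simp only [h] <;> norm_num <;> ring

-- ===== VERDICT (by name: the statement is the Claim_ definition above) =====
theorem toggleKBits_spec : Claim_equal_toggleKBits := by
  intro n k _ hpre
  obtain ⟨hn, hk⟩ := hpre
  show toggleKBits n k = toggleKBits_alt n k
  have hA : toggleKBits n k = 0 + 1 * ((n.toNat ^^^ (2 ^ k.toNat - 1) : Nat) : Int) := by
    show toggleKBitsLoop2 (toggleKBitsLoop1 n k 0 1).1
        (toggleKBitsLoop1 n k 0 1).2.1 (toggleKBitsLoop1 n k 0 1).2.2 = _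
    rw [show n = ((n.toNat : Nat) : Int) from (Int.toNat_of_nonneg hn).symm]
    exact loop1_closed n.toNat k 0 1 hk
  have hB : toggleKBits_alt n k = ((n.toNat ^^^ (2 ^ k.toNat - 1) : Nat) : Int) := by
    show PySem.Int.bxor n (((1 : Int) <<< k.toNat) - 1) = _
    rw [Int.shiftLeft_eq, one_mul, ← mask_cast,
        show n = ((n.toNat : Nat) : Int) from (Int.toNat_of_nonneg hn).symm,
        PySem.Int.bxor_natCast, Int.toNat_natCast]
  rw [hA, hB]; ring
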